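-- pv_equiv track=rewrite | github.com/yeolsim2hajo/Team_hard | wonkyoung/programmers/level 1/음양_더하기.py | solution
-- ===== SOURCE A (Python) =====
-- def solution(absolutes, signs):
--     answer = 0
--     length = len(signs)
--     for i in range(length):
--         if signs[i]:
--             answer += absolutes[i]
--         else:
--             answer -= absolutes[i]
--     return answer
-- ===== SOURCE B (Python) =====
-- def solution(absolutes, signs):
--     length = len(signs)
--     total = sum(absolutes[i] for i in range(length))
--     neg = sum(absolutes[i] for i in range(length) if not signs[i])
--     return total - 2 * neg
-- ===== Notes on version B (the rewrite author's own statement) =====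
-- stated objective: alternative
-- what changed: Replaces A's single combined add/subtract loop by two sum passes (total of all absolutes, and of those with falsy sign) combined with the identity total - 2*neg.
import Mathlib
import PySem

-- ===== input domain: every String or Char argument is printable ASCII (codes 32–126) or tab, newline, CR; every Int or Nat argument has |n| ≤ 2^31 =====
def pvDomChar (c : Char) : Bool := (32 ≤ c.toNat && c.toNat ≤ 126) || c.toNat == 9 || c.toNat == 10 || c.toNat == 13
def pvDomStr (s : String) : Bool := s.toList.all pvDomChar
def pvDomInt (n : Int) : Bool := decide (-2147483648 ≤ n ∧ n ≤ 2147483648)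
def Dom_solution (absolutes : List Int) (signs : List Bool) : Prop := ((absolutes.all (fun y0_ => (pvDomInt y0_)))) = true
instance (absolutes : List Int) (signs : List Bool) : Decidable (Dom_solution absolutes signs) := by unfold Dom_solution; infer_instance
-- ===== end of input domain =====

-- B computes the same signed sum as total-of-absolutes minus twice the sum of the negatively-signed ones.

-- ===== PORT A =====
def solution (absolutes : List Int) (signs : List Bool) : Int :=
  (PySem.List.pyRange 0 (signs.length : Int) 1).foldl
    (fun answer i =>
      if PySem.List.pyGetD signs i false then answer + PySem.List.pyGetD absolutes i 0
      else answer - PySem.List.pyGetD absolutes i 0) 0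

-- ===== PORT B =====
def solution_alt (absolutes : List Int) (signs : List Bool) : Int :=
  let length : Int := (signs.length : Int)
  let total := ((PySem.List.pyRange 0 length 1).map (fun i => PySem.List.pyGetD absolutes i 0)).sum
  let neg := (((PySem.List.pyRange 0 length 1).filter
      (fun i => !(PySem.List.pyGetD signs i false))).map (fun i => PySem.List.pyGetD absolutes i 0)).sum
  total - 2 * neg

-- ===== PRECONDITION & SPEC =====
-- Pre_ excludes exactly the inputs where A (and B) raise IndexError: signs longer than absolutes.
def Pre_solution (absolutes : List Int) (signs : List Bool) : Prop :=
  signs.length ≤ absolutes.length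
instance (absolutes : List Int) (signs : List Bool) : Decidable (Pre_solution absolutes signs) := by
  unfold Pre_solution; infer_instance

def pvWitness_solution : List Int × List Bool := ([4, 7, 12], [true, false, true])

def Spec_solution (absolutes : List Int) (signs : List Bool) (out : Int) : Prop := out = solution_alt absolutes signs
instance (absolutes : List Int) (signs : List Bool) (out : Int) : Decidable (Spec_solution absolutes signs out) := by unfold Spec_solution; infer_instance

-- ===== CLAIM (what is proved, stated in full; the proofs are below) =====
def Claim_equal_solution : Prop := ∀ (absolutes : List Int) (signs : List Bool), Dom_solution absolutes signs → Pre_solution absolutes signs → Spec_solution absolutes signs (solution absolutes signs)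

-- ===== LEMMAS AND PROOFS =====

theorem solution_key (absolutes : List Int) (signs : List Bool) (n : Nat) :
    (PySem.List.pyRange 0 (n : Int) 1).foldl
      (fun answer i =>
        if PySem.List.pyGetD signs i false then answer + PySem.List.pyGetD absolutes i 0
        else answer - PySem.List.pyGetD absolutes i 0) 0
    = ((PySem.List.pyRange 0 (n : Int) 1).map (fun i => PySem.List.pyGetD absolutes i 0)).sum
      - 2 * (((PySem.List.pyRange 0 (n : Int) 1).filter
          (fun i => !(PySem.List.pyGetD signs i false))).map (fun i => PySem.List.pyGetD absolutes i 0)).sum := by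
  induction n with
  | zero => simp [PySem.List.pyRange_zero]
  | succ m ih =>
    have h : ((m : Int) + 1) = (((m + 1 : Nat) : Int)) := by push_cast; ring
    have hsplit := PySem.List.pyRange_one_succ_right (a := 0) (b := (m : Int)) (by positivity)
    rw [← h, hsplit, List.foldl_append, List.map_append, List.filter_append, ih]
    by_cases hb : PySem.List.pyGetD signs (m : Int) false
    · simp [hb]; ring
    · simp [hb]; ring

-- ===== VERDICT (by name: the statement is the Claim_ definition above) =====
theorem solution_spec : Claim_equal_solution := by
  intro absolutes signs _ _
  unfold Spec_solution solution solution_alt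
  exact solution_key absolutes signs signs.length
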